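-- pv_equiv track=rewrite | github.com/kokafor1/hww4d2 | whiteboard.py | solution
-- ===== SOURCE A (Python) =====
-- def solution(gloves):
--     color_counts = {}
--     for color in gloves:
--         color_counts[color] = color_counts.get(color, 0) + 1
--
--     total_pairs = 0
--     for count in color_counts.values():
--         total_pairs += count // 2
--
--     return total_pairs
-- ===== SOURCE B (Python) =====
-- def solution(gloves):
--     total = 0
--     prev = None
--     run = 0
--     for color in sorted(gloves):
--         if color == prev:
--             run += 1
--         else:
--             total += run // 2
--             prev = color
--             run = 1
--     return total + run // 2
-- ===== Notes on version B (the rewrite author's own statement) =====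
-- stated objective: alternative
-- what changed: Replaces the dictionary-counting pass over colors with a sort-then-scan: sort the list once and add run_length // 2 whenever the run of equal adjacent colors ends.
import Mathlib
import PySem

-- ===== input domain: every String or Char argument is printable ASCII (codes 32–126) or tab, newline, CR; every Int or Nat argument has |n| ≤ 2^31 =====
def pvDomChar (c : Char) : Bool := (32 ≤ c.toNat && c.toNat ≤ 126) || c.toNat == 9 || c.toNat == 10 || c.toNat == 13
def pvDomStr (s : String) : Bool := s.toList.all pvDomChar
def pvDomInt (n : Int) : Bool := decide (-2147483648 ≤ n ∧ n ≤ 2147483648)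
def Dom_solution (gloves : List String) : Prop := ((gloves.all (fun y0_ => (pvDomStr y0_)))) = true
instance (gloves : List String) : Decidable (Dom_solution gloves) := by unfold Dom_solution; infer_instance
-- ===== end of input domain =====

-- B replaces A's dictionary counting with a sort-then-scan over runs of equal colors (alternative decomposition, same result).

-- ===== PORT A =====
def solution (gloves : List String) : Int :=
  let color_counts : PySem.Dict String Int :=
    gloves.foldl (fun d color => d.insert color (d.getD color 0 + 1)) PySem.Dict.empty
  color_counts.values.foldl (fun total_pairs count => total_pairs + PySem.Int.floordiv count 2) 0

-- ===== PORT B =====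
def solution_alt (gloves : List String) : Int :=
  let fin :=
    (PySem.List.sorted gloves (fun x => x) false).foldl
      (fun (st : Option String × Int × Int) color =>
        if some color == st.1 then (st.1, st.2.1 + 1, st.2.2)
        else (some color, 1, st.2.2 + PySem.Int.floordiv st.2.1 2))
      (none, 0, 0)
  fin.2.2 + PySem.Int.floordiv fin.2.1 2

-- ===== PRECONDITION & SPEC =====
def Spec_solution (gloves : List String) (out : Int) : Prop := out = solution_alt gloves
instance (gloves : List String) (out : Int) : Decidable (Spec_solution gloves out) := by unfold Spec_solution; infer_instance

-- ===== CLAIM (what is proved, stated in full; the proofs are below) =====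
def Claim_equal_solution : Prop := ∀ (gloves : List String), Dom_solution gloves → Spec_solution gloves (solution gloves)

-- ===== LEMMAS AND PROOFS =====

-- sum of count//2 over the distinct colors: both programs compute this
def pairsOf (l : List String) : Int :=
  ((PySem.Set.ofList l).map (fun k => PySem.Int.floordiv ((l.count k : Nat) : Int) 2)).sum

lemma foldl_add_fd (l : List Int) (t : Int) :
    l.foldl (fun a c => a + PySem.Int.floordiv c 2) t
      = t + (l.map (fun c => PySem.Int.floordiv c 2)).sum := by
  induction l generalizing t with
  | nil => simp
  | cons x xs ih =>
    simp only [List.foldl_cons, List.map_cons, List.sum_cons]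
    rw [ih]; ring

lemma solution_eq_pairsOf (g : List String) : solution g = pairsOf g := by
  unfold solution pairsOf
  rw [PySem.Dict.foldl_insert_getD_add_one_eq_counter]
  simp only [PySem.Dict.values, PySem.Dict.items_counter, List.map_map, foldl_add_fd]
  rw [zero_add]
  rfl

lemma pairsOf_perm {l l' : List String} (h : l.Perm l') : pairsOf l = pairsOf l' := by
  unfold pairsOf
  have hf : (fun k => PySem.Int.floordiv ((l.count k : Nat) : Int) 2)
      = (fun k => PySem.Int.floordiv ((l'.count k : Nat) : Int) 2) := by
    funext k; rw [h.count_eq]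
  have hp : (PySem.Set.ofList l).Perm (PySem.Set.ofList l') := by
    rw [List.perm_ext_iff_of_nodup (PySem.Set.nodup_ofList _) (PySem.Set.nodup_ofList _)]
    intro a; simp [PySem.Set.mem_ofList, h.mem_iff]
  rw [hf]
  exact (hp.map _).sum_eq

lemma pairsOf_cons (x : String) (l : List String) :
    pairsOf (x :: l)
      = PySem.Int.floordiv (((x :: l).count x : Nat) : Int) 2
        + pairsOf (l.filter (fun k => k != x)) := by
  unfold pairsOf
  have hp : (PySem.Set.ofList (x :: l)).Perm (x :: PySem.Set.ofList (l.filter (fun k => k != x))) := by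
    rw [List.perm_ext_iff_of_nodup (PySem.Set.nodup_ofList _) ?_]
    · intro a
      simp only [PySem.Set.mem_ofList, List.mem_cons, List.mem_filter, bne_iff_ne]
      by_cases hax : a = x <;> simp [hax]
    · refine List.nodup_cons.2 ⟨?_, PySem.Set.nodup_ofList _⟩
      intro hx
      have := (List.mem_filter.1 ((PySem.Set.mem_ofList _ _).1 hx)).2
      simp at this
  rw [(hp.map _).sum_eq, List.map_cons, List.sum_cons]
  congr 1
  refine congrArg List.sum (List.map_congr_left ?_)
  intro k hk
  have hkx : k ≠ x := by
    have := (List.mem_filter.1 ((PySem.Set.mem_ofList _ _).1 hk)).2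
    simpa using this
  have h1 : (x :: l).count k = l.count k := by simp [Ne.symm hkx]
  have h2 : (l.filter (fun k => k != x)).count k = l.count k := by
    rw [List.count_filter]; simp [hkx]
  rw [h1, h2]

-- the scan over a run-sorted tail, starting inside a run of color c
lemma scan_run (s : List String) : ∀ (c : String) (r t : Int),
    s.Pairwise (· ≤ ·) → (∀ y ∈ s, c ≤ y) →
    (let fin := s.foldl
        (fun (st : Option String × Int × Int) color =>
          if some color == st.1 then (st.1, st.2.1 + 1, st.2.2)
          else (some color, 1, st.2.2 + PySem.Int.floordiv st.2.1 2))
        (some c, r, t)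
     fin.2.2 + PySem.Int.floordiv fin.2.1 2)
      = t + PySem.Int.floordiv (r + ((s.count c : Nat) : Int)) 2
          + pairsOf (s.filter (fun k => k != c)) := by
  induction s with
  | nil => intro c r t _ _; simp [pairsOf, PySem.Set.ofList]
  | cons x s ih =>
    intro c r t hpw hinv
    have hpw' := (List.pairwise_cons.1 hpw).2
    have hxle := (List.pairwise_cons.1 hpw).1
    by_cases hxc : x = c
    · subst hxc
      simp only [List.foldl_cons, beq_self_eq_true, if_true]
      rw [ih x (r + 1) t hpw' hxle]
      rw [List.count_cons_self]
      have : ((s.count x + 1 : Nat) : Int) = (s.count x : Nat) + 1 := by push_cast; ring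
      rw [this]
      have hfil : (x :: s).filter (fun k => k != x) = s.filter (fun k => k != x) := by
        simp
      rw [hfil]
      congr 2
      ring
    · have hb : (some x == some c) = false := by
        simp [hxc]
      simp only [List.foldl_cons, hb, Bool.false_eq_true, if_false]
      rw [ih x 1 (t + PySem.Int.floordiv r 2) hpw' hxle]
      have hcnot : c ∉ x :: s := by
        intro hc
        rcases List.mem_cons.1 hc with h | h
        · exact hxc h.symm
        · exact hxc (le_antisymm (hinv x (by simp)) (hxle c h)).symm
      have hcount : ((x :: s).count c : Nat) = 0 := List.count_eq_zero.2 hcnot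
      have hfil : (x :: s).filter (fun k => k != c) = x :: s := by
        apply List.filter_eq_self.2
        intro a ha
        simp only [bne_iff_ne, ne_eq]
        intro hac; exact hcnot (hac ▸ ha)
      rw [hcount, hfil, pairsOf_cons, List.count_cons_self]
      have : ((s.count x + 1 : Nat) : Int) = 1 + (s.count x : Nat) := by push_cast; ring
      rw [this]
      push_cast
      ring

lemma solution_alt_eq_pairsOf (g : List String) : solution_alt g = pairsOf g := by
  unfold solution_alt
  have hperm : (PySem.List.sorted g (fun x => x) false).Perm g := PySem.List.sorted_perm g _ _
  cases hs : PySem.List.sorted g (fun x => x) false with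
  | nil =>
    have hg : g = [] := by
      have h := hperm; rw [hs] at h; exact h.symm.eq_nil
    subst hg
    simp [pairsOf, PySem.Set.ofList]
  | cons x s =>
    have hpw : (x :: s).Pairwise (fun a b : String => a ≤ b) := by
      have := PySem.List.sorted_pairwise g (fun x => x) (κ := String)
      rwa [hs] at this
    have hpw' := (List.pairwise_cons.1 hpw).2
    have hxle := (List.pairwise_cons.1 hpw).1
    simp only [List.foldl_cons]
    have hb : (some x == (none : Option String)) = false := rfl
    rw [hb]
    simp only [Bool.false_eq_true, if_false]
    have h0 : PySem.Int.floordiv 0 2 = 0 := rfl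
    rw [h0]
    have := scan_run s x 1 (0 + 0) hpw' hxle
    simp only at this
    rw [this]
    rw [← pairsOf_perm hperm, hs, pairsOf_cons, List.count_cons_self]
    have : ((s.count x + 1 : Nat) : Int) = 1 + (s.count x : Nat) := by push_cast; ring
    rw [this]
    ring

-- ===== VERDICT (by name: the statement is the Claim_ definition above) =====
theorem solution_spec : Claim_equal_solution := by
  intro g _
  unfold Spec_solution
  rw [solution_eq_pairsOf, solution_alt_eq_pairsOf]
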